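-- pv_equiv track=rewrite | github.com/dlstjd92/Algorithm_storage | 프로그래머스/2/250136. ［PCCP 기출문제］ 2번 ／ 석유 시추/［PCCP 기출문제］ 2번 ／ 석유 시추.py | solution
-- ===== SOURCE A (Python) =====
-- def solution(land):
--     n = len(land)
--     m = len(land[0])
--     parents = [i for i in range(n * m)]
--     def is_parent(node):
--         return node == parents[node]
--
--     def get_parent(node):
--         parent_candidate = parents[node]
--         if is_parent(parent_candidate):
--             return parent_candidate
--         real_parent = get_parent(parent_candidate)
--         parents[node] = real_parent
--         return real_parent
--
--     for child in range(n * m):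
--         i = child // m
--         j = child % m
--         if land[i][j] == 0:
--             continue
--         if j > 0 and land[i][j - 1] == 1:
--             parent1 = get_parent(child)
--             parent2 = get_parent(child - 1)
--             if parent1 < parent2:
--                 parents[parent2] = parent1
--                 parents[child - 1] = parent1
--             elif parent2 < parent1:
--                 parents[parent1] = parent2
--                 parents[child] = parent2
--         if i > 0 and land[i - 1][j] == 1:
--             parent1 = get_parent(child)
--             parent2 = get_parent(child - m)
--             if parent1 < parent2:
--                 parents[parent2] = parent1
--                 parents[child - m] = parent1
--             elif parent2 < parent1:
--                 parents[parent1] = parent2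
--                 parents[child] = parent2
--     gas_amount_list = [0 for i in range(n * m)]
--     col_gas_group_list = [set() for _ in range(m)]
--     for i in range(n):
--         for j in range(m):
--             if land[i][j] == 0:
--                 continue
--             p = get_parent(i * m + j)
--             gas_amount_list[p] += 1
--             col_gas_group_list[j].add(p)
--
--     max_cnt_sum = 0
--     for j in range(m):
--         gas_groups = col_gas_group_list[j]
--         cnt_sum = 0
--         for gas_group in gas_groups:
--             cnt_sum += gas_amount_list[gas_group]
--         if max_cnt_sum < cnt_sum:
--             max_cnt_sum = cnt_sum
--
--     return max_cnt_sum
-- ===== SOURCE B (Python) =====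
-- def solution(land):
--     n, m = len(land), len(land[0])
--     label = list(range(n * m))
--
--     def merged(lab, a, b):
--         la, lb = lab[a], lab[b]
--         if la == lb:
--             return lab
--         lo, hi = (la, lb) if la < lb else (lb, la)
--         return [lo if x == hi else x for x in lab]
--
--     for i in range(n):
--         for j in range(m):
--             if land[i][j] == 0:
--                 continue
--             if j > 0 and land[i][j - 1] == 1:
--                 label = merged(label, i * m + j, i * m + j - 1)
--             if i > 0 and land[i - 1][j] == 1:
--                 label = merged(label, i * m + j, (i - 1) * m + j)
--
--     size = {}
--     for i in range(n):
--         for j in range(m):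
--             if land[i][j] != 0:
--                 l = label[i * m + j]
--                 size[l] = size.get(l, 0) + 1
--
--     best = 0
--     for j in range(m):
--         groups = {label[i * m + j] for i in range(n) if land[i][j] != 0}
--         best = max(best, sum(size[g] for g in groups))
--     return best
-- ===== Notes on version B (the rewrite author's own statement) =====
-- stated objective: alternative
-- what changed: Replaces A's union-find (parent array, recursive find with path compression, union by smaller root, then per-root counting into an index list) with a flat component-label list that is wholly repainted on each merge, a size dict keyed by label and per-column label sets; no parent pointers, no find recursion.
import Mathlib
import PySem

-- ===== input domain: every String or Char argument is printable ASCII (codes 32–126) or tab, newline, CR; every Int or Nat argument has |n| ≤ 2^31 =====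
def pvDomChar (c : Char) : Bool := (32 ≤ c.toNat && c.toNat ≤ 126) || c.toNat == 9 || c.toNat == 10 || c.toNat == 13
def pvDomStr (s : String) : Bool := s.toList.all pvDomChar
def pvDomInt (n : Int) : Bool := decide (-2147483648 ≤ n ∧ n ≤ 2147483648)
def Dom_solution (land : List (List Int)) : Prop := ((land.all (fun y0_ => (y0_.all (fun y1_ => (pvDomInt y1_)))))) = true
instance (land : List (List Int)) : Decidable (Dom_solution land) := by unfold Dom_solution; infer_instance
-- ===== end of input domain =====

-- B replaces A's union-find (path-compressed parent array, union by smaller root) with a direct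
-- component-label list that is wholly relabelled on each merge, plus dict/set counting: an
-- alternative algorithm of similar size, not claimed faster.

-- ===== PORT A =====
-- get_parent with path compression; fuel bounds the recursion depth (parents[i] ≤ i always holds,
-- so fuel node+1 at each call site is enough; Python needs no fuel).
def pvGetParent : Nat → List Nat → Nat → Nat × List Nat
  | 0, P, node => (node, P)
  | f+1, P, node =>
    let pc := P.getD node 0
    if P.getD pc 0 = pc then (pc, P)
    else
      let r := (pvGetParent f P pc).1
      let P1 := (pvGetParent f P pc).2
      (r, P1.set node r)

-- the two get_parent calls and the two writes of one union block of A's main loop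
def pvUnion (P : List Nat) (c c' : Nat) : List Nat :=
  let g1 := pvGetParent (c+1) P c
  let g2 := pvGetParent (c'+1) g1.2 c'
  if g1.1 < g2.1 then ((g2.2).set g2.1 g1.1).set c' g1.1
  else if g2.1 < g1.1 then ((g2.2).set g1.1 g2.1).set c g2.1
  else g2.2

-- body of A's main loop, one child
def pvAStep (land : List (List Int)) (m : Nat) (P : List Nat) (child : Nat) : List Nat :=
  let i := child / m
  let j := child % m
  if (land.getD i []).getD j 0 = 0 then P
  else
    let P1 := if 0 < j ∧ (land.getD i []).getD (j-1) 0 = 1 then pvUnion P child (child-1) else P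
    if 0 < i ∧ (land.getD (i-1) []).getD j 0 = 1 then pvUnion P1 child (child-m) else P1

-- body of A's counting loop: state (gas_amount_list, col_gas_group_list, parents)
def pvACount (land : List (List Int)) (m : Nat)
    (st : List Int × List (PySem.Set Nat) × List Nat) (i j : Nat) :
    List Int × List (PySem.Set Nat) × List Nat :=
  if (land.getD i []).getD j 0 = 0 then st
  else
    let g := pvGetParent (i*m+j+1) st.2.2 (i*m+j)
    (st.1.set g.1 (st.1.getD g.1 0 + 1),
     (st.2.1).set j (PySem.Set.add ((st.2.1).getD j PySem.Set.empty) g.1),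
     g.2)

def solution (land : List (List Int)) : Int :=
  let n := land.length
  let m := (land.getD 0 []).length
  let parents := (List.range (n*m)).foldl (pvAStep land m) (List.range (n*m))
  let st := (List.range n).foldl (fun st i =>
      (List.range m).foldl (fun st j => pvACount land m st i j) st)
    (List.replicate (n*m) (0:Int), List.replicate m (PySem.Set.empty : PySem.Set Nat), parents)
  (List.range m).foldl (fun mx j =>
    let cnt := ((st.2.1).getD j PySem.Set.empty).foldl (fun acc g => acc + st.1.getD g 0) 0
    if mx < cnt then cnt else mx) 0

-- ===== PORT B =====
-- merged(lab, a, b) of Source B: repaint the larger of the two labels to the smaller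
def pvMerged (lab : List Nat) (a b : Nat) : List Nat :=
  let la := lab.getD a 0
  let lb := lab.getD b 0
  if la = lb then lab
  else
    let lo := if la < lb then la else lb
    let hi := if la < lb then lb else la
    lab.map (fun x => if x = hi then lo else x)

-- body of B's labelling loop, one cell
def pvBStep (land : List (List Int)) (m : Nat) (lab : List Nat) (i j : Nat) : List Nat :=
  if (land.getD i []).getD j 0 = 0 then lab
  else
    let lab1 := if 0 < j ∧ (land.getD i []).getD (j-1) 0 = 1 then pvMerged lab (i*m+j) (i*m+j-1) else lab
    if 0 < i ∧ (land.getD (i-1) []).getD j 0 = 1 then pvMerged lab1 (i*m+j) ((i-1)*m+j) else lab1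

-- body of B's size-dict loop, one cell
def pvBCount (land : List (List Int)) (m : Nat) (lab : List Nat)
    (sz : PySem.Dict Nat Int) (i j : Nat) : PySem.Dict Nat Int :=
  if (land.getD i []).getD j 0 ≠ 0 then
    sz.insert (lab.getD (i*m+j) 0) (sz.getD (lab.getD (i*m+j) 0) 0 + 1)
  else sz

def solution_alt (land : List (List Int)) : Int :=
  let n := land.length
  let m := (land.getD 0 []).length
  let label := (List.range n).foldl (fun lab i =>
      (List.range m).foldl (fun lab j => pvBStep land m lab i j) lab) (List.range (n*m))
  let size := (List.range n).foldl (fun sz i =>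
      (List.range m).foldl (fun sz j => pvBCount land m label sz i j) sz)
    (PySem.Dict.empty : PySem.Dict Nat Int)
  (List.range m).foldl (fun best j =>
    let groups := PySem.Set.ofList ((List.range n).filterMap (fun i =>
        if (land.getD i []).getD j 0 ≠ 0 then some (label.getD (i*m+j) 0) else none))
    max best (groups.foldl (fun acc g => acc + size.getD g 0) 0)) 0

-- ===== PRECONDITION & SPEC =====
-- Pre_ excludes exactly the inputs on which the Python A raises IndexError: the empty grid, and
-- grids in which some row is shorter than the first row.
def Pre_solution (land : List (List Int)) : Prop :=
  land ≠ [] ∧ ∀ row ∈ land, (land.getD 0 []).length ≤ row.length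
instance (land : List (List Int)) : Decidable (Pre_solution land) := by unfold Pre_solution; infer_instance
def pvWitness_solution : List (List Int) := [[1, 0], [1, 1]]
def Spec_solution (land : List (List Int)) (out : Int) : Prop := out = solution_alt land
instance (land : List (List Int)) (out : Int) : Decidable (Spec_solution land out) := by unfold Spec_solution; infer_instance

-- ===== CLAIM (what is proved, stated in full; the proofs are below) =====
def Claim_equal_solution : Prop := ∀ (land : List (List Int)), Dom_solution land → Pre_solution land → Spec_solution land (solution land)

-- ===== LEMMAS AND PROOFS =====

-- `parents` lists are decreasing: every entry is at most its index
def pvDec (P : List Nat) : Prop := ∀ i, P.getD i 0 ≤ i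

-- reference root-chasing function (no compression), fuel-bounded
def pvRootF : Nat → List Nat → Nat → Nat
  | 0, _, i => i
  | f+1, P, i => let p := P.getD i 0; if p = i then i else pvRootF f P p

-- the root of i in parent list P
def pvR (P : List Nat) (i : Nat) : Nat := pvRootF (i+1) P i

lemma pvGetD_set {α : Type} (P : List α) (k : Nat) (v : α) (i : Nat) {d : α} :
    (P.set k v).getD i d = if i = k ∧ k < P.length then v else P.getD i d := by
  simp [List.getD_eq_getElem?_getD, List.getElem?_set]
  split_ifs <;> simp_all

lemma pvDec_set {P : List Nat} {k v : Nat} (hD : pvDec P) (hv : v ≤ k) : pvDec (P.set k v) := by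
  intro i
  rw [pvGetD_set]
  split_ifs with h
  · omega
  · exact hD i


lemma pvRootF_succ (f : Nat) (P : List Nat) (i : Nat) :
    pvRootF (f+1) P i = if P.getD i 0 = i then i else pvRootF f P (P.getD i 0) := rfl

lemma pvGetParent_succ (f : Nat) (P : List Nat) (node : Nat) :
    pvGetParent (f+1) P node =
      if P.getD (P.getD node 0) 0 = P.getD node 0 then (P.getD node 0, P)
      else ((pvGetParent f P (P.getD node 0)).1,
        (pvGetParent f P (P.getD node 0)).2.set node (pvGetParent f P (P.getD node 0)).1) := rfl

lemma pvRootF_eq {P : List Nat} (hD : pvDec P) : ∀ f i, i < f → pvRootF f P i = pvR P i := by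
  intro f
  induction f using Nat.strong_induction_on with
  | _ f ih =>
    intro i hif
    obtain ⟨f', rfl⟩ : ∃ f', f = f'+1 := ⟨f-1, by omega⟩
    by_cases h : P.getD i 0 = i
    · simp only [pvR, pvRootF_succ, if_pos h]
    · have hq : P.getD i 0 < i := lt_of_le_of_ne (hD i) h
      have h1 : pvRootF f' P (P.getD i 0) = pvR P (P.getD i 0) := ih f' (by omega) _ (by omega)
      have h2 : pvRootF i P (P.getD i 0) = pvR P (P.getD i 0) := ih i (by omega) _ (by omega)
      simp only [pvR, pvRootF_succ, if_neg h]
      rw [h1, h2]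

lemma pvR_step {P : List Nat} (hD : pvDec P) (i : Nat) :
    pvR P i = if P.getD i 0 = i then i else pvR P (P.getD i 0) := by
  by_cases h : P.getD i 0 = i
  · simp only [pvR, pvRootF_succ, if_pos h]
  · have hq : P.getD i 0 < i := lt_of_le_of_ne (hD i) h
    simp only [pvR, pvRootF_succ, if_neg h]
    exact pvRootF_eq hD i _ hq

lemma pvR_of_root {P : List Nat} {i : Nat} (h : P.getD i 0 = i) : pvR P i = i := by
  simp only [pvR, pvRootF_succ, if_pos h]

lemma pvR_le {P : List Nat} (hD : pvDec P) : ∀ i, pvR P i ≤ i := by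
  intro i
  induction i using Nat.strong_induction_on with
  | _ i ih =>
    rw [pvR_step hD]
    split_ifs with h
    · exact le_refl i
    · have hq : P.getD i 0 < i := lt_of_le_of_ne (hD i) h
      exact le_trans (ih _ hq) (le_of_lt hq)

lemma pvR_root {P : List Nat} (hD : pvDec P) : ∀ i, P.getD (pvR P i) 0 = pvR P i := by
  intro i
  induction i using Nat.strong_induction_on with
  | _ i ih =>
    rw [pvR_step hD]
    split_ifs with h
    · exact h
    · exact ih _ (lt_of_le_of_ne (hD i) h)

lemma pvR_set_comp {P : List Nat} (hD : pvDec P) {k r : Nat} (hr : pvR P k = r) :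
    ∀ i, pvR (P.set k r) i = pvR P i := by
  have hrk : r ≤ k := hr ▸ pvR_le hD k
  have hDr : pvDec (P.set k r) := pvDec_set hD hrk
  intro i
  induction i using Nat.strong_induction_on with
  | _ i ih =>
    by_cases hik : i = k ∧ k < P.length
    · obtain ⟨rfl, hkl⟩ := hik
      have hPk : (P.set i r).getD i 0 = r := by rw [pvGetD_set]; simp [hkl]
      by_cases hri : r = i
      · have hfix : pvR P i = i := by rw [hr, hri]
        rw [pvR_of_root (hri ▸ hPk), hfix]
      · have hPr : (P.set i r).getD r 0 = r := by
          rw [pvGetD_set, if_neg (by simp [hri])]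
          exact hr ▸ pvR_root hD i
        rw [pvR_step hDr, hPk, if_neg hri, pvR_of_root hPr, hr]
    · have hPi : (P.set k r).getD i 0 = P.getD i 0 := by rw [pvGetD_set, if_neg hik]
      rw [pvR_step hDr, hPi]
      by_cases hroot : P.getD i 0 = i
      · rw [if_pos hroot, pvR_of_root hroot]
      · rw [if_neg hroot, ih _ (lt_of_le_of_ne (hD i) hroot), pvR_step hD i, if_neg hroot]

lemma pvR_set_union {P : List Nat} (hD : pvDec P) {k r : Nat}
    (hk : P.getD k 0 = k) (hr : P.getD r 0 = r) (hrk : r < k) :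
    ∀ i, pvR (P.set k r) i = if pvR P i = k then r else pvR P i := by
  have hDr : pvDec (P.set k r) := pvDec_set hD (le_of_lt hrk)
  intro i
  induction i using Nat.strong_induction_on with
  | _ i ih =>
    by_cases hik : i = k ∧ k < P.length
    · obtain ⟨rfl, hkl⟩ := hik
      have hPk : (P.set i r).getD i 0 = r := by rw [pvGetD_set]; simp [hkl]
      have hri : r ≠ i := by omega
      have hPr : (P.set i r).getD r 0 = r := by
        rw [pvGetD_set, if_neg (by simp [hri])]; exact hr
      rw [pvR_step hDr, hPk, if_neg hri, pvR_of_root hPr, pvR_of_root hk, if_pos rfl]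
    · have hPi : (P.set k r).getD i 0 = P.getD i 0 := by rw [pvGetD_set, if_neg hik]
      by_cases hroot : P.getD i 0 = i
      · have hine : i ≠ k := by
          rintro rfl
          have hkl : ¬ i < P.length := fun h => hik ⟨rfl, h⟩
          have h0 : P.getD i 0 = 0 := List.getD_eq_default _ _ (by omega)
          omega
        rw [pvR_step hDr, hPi, if_pos hroot, pvR_of_root hroot, if_neg hine]
      · rw [pvR_step hDr, hPi, if_neg hroot, ih _ (lt_of_le_of_ne (hD i) hroot)]
        conv_rhs => rw [pvR_step hD i, if_neg hroot]

lemma pvGetParent_spec {P : List Nat} (hD : pvDec P) : ∀ f node, node < f →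
    (pvGetParent f P node).1 = pvR P node ∧
    pvDec (pvGetParent f P node).2 ∧
    (pvGetParent f P node).2.length = P.length ∧
    (∀ i, pvR (pvGetParent f P node).2 i = pvR P i) := by
  intro f
  induction f with
  | zero => intro node h; omega
  | succ f ih =>
    intro node _
    rw [pvGetParent_succ]
    by_cases hpc : P.getD (P.getD node 0) 0 = P.getD node 0
    · rw [if_pos hpc]
      refine ⟨?_, hD, rfl, fun i => rfl⟩
      show P.getD node 0 = pvR P node
      rw [pvR_step hD]
      by_cases h : P.getD node 0 = node
      · rw [if_pos h, h]
      · rw [if_neg h, pvR_of_root hpc]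
    · rw [if_neg hpc]
      have hne : P.getD node 0 ≠ node := by
        intro h
        apply hpc
        rw [h]
        exact h
      have hplt : P.getD node 0 < node := lt_of_le_of_ne (hD node) hne
      obtain ⟨h1, h2, h3, h4⟩ := ih (P.getD node 0) (by omega)
      have hRnode : pvR P node = pvR P (P.getD node 0) := by
        rw [pvR_step hD node, if_neg hne]
      have hcomp : pvR (pvGetParent f P (P.getD node 0)).2 node =
          (pvGetParent f P (P.getD node 0)).1 := by
        rw [h4, hRnode, h1]
      refine ⟨?_, ?_, ?_, ?_⟩
      · show (pvGetParent f P (P.getD node 0)).1 = pvR P node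
        rw [h1, hRnode]
      · show pvDec ((pvGetParent f P (P.getD node 0)).2.set node (pvGetParent f P (P.getD node 0)).1)
        apply pvDec_set h2
        have := pvR_le hD (P.getD node 0)
        rw [h1]
        omega
      · show ((pvGetParent f P (P.getD node 0)).2.set node (pvGetParent f P (P.getD node 0)).1).length = P.length
        rw [List.length_set, h3]
      · intro i
        show pvR ((pvGetParent f P (P.getD node 0)).2.set node (pvGetParent f P (P.getD node 0)).1) i = pvR P i
        rw [pvR_set_comp h2 hcomp i, h4]

-- linking root p2 below root p1 and compressing cw (whose root was p2)
lemma pvLink {Q : List Nat} (hDQ : pvDec Q) {p1 p2 cw : Nat}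
    (h1 : Q.getD p1 0 = p1) (h2 : Q.getD p2 0 = p2) (h12 : p1 < p2) (hcw : pvR Q cw = p2) :
    pvDec ((Q.set p2 p1).set cw p1) ∧ ((Q.set p2 p1).set cw p1).length = Q.length ∧
    ∀ i, pvR ((Q.set p2 p1).set cw p1) i = if pvR Q i = p2 then p1 else pvR Q i := by
  have hDa : pvDec (Q.set p2 p1) := pvDec_set hDQ (le_of_lt h12)
  have hun : ∀ i, pvR (Q.set p2 p1) i = if pvR Q i = p2 then p1 else pvR Q i :=
    pvR_set_union hDQ h2 h1 h12
  have hcomp : pvR (Q.set p2 p1) cw = p1 := by rw [hun cw, if_pos hcw]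
  refine ⟨?_, by simp, fun i => by rw [pvR_set_comp hDa hcomp i, hun i]⟩
  apply pvDec_set hDa
  rw [← hcomp]
  exact pvR_le hDa cw

lemma pvUnion_spec {P : List Nat} (hD : pvDec P) (c c' : Nat) :
    pvDec (pvUnion P c c') ∧ (pvUnion P c c').length = P.length ∧
    ∀ i, pvR (pvUnion P c c') i =
      if pvR P i = max (pvR P c) (pvR P c') ∧ pvR P c ≠ pvR P c'
      then min (pvR P c) (pvR P c') else pvR P i := by
  obtain ⟨ha1, ha2, ha3, ha4⟩ := pvGetParent_spec hD (c+1) c (by omega)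
  obtain ⟨hb1, hb2, hb3, hb4⟩ := pvGetParent_spec ha2 (c'+1) c' (by omega)
  simp only [pvUnion]
  set P2 := (pvGetParent (c'+1) (pvGetParent (c+1) P c).2 c').2 with hP2
  set p1 := (pvGetParent (c+1) P c).1 with hp1d
  set p2 := (pvGetParent (c'+1) (pvGetParent (c+1) P c).2 c').1 with hp2d
  have hp1 : p1 = pvR P c := ha1
  have hp2 : p2 = pvR P c' := by rw [hb1, ha4]
  have hroots2 : ∀ i, pvR P2 i = pvR P i := fun i => by rw [hb4, ha4]
  have hlen2 : P2.length = P.length := by rw [hb3, ha3]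
  have hD2 : pvDec P2 := hb2
  have hroot1 : P2.getD p1 0 = p1 := by
    have h := pvR_root hD2 c
    rwa [hroots2 c, ← hp1] at h
  have hroot2 : P2.getD p2 0 = p2 := by
    have h := pvR_root hD2 c'
    rwa [hroots2 c', ← hp2] at h
  have hRc' : pvR P2 c' = p2 := by rw [hroots2 c', hp2]
  have hRc : pvR P2 c = p1 := by rw [hroots2 c, hp1]
  rcases Nat.lt_trichotomy p1 p2 with h | h | h
  · rw [if_pos h]
    obtain ⟨hA, hB, hC⟩ := pvLink hD2 hroot1 hroot2 h hRc'
    refine ⟨hA, hB.trans hlen2, fun i => ?_⟩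
    rw [hC i, hroots2 i]
    rw [hp1, hp2] at h
    split_ifs <;> omega
  · rw [if_neg (by omega), if_neg (by omega)]
    refine ⟨hD2, hlen2, fun i => ?_⟩
    rw [hroots2 i]
    rw [hp1, hp2] at h
    split_ifs <;> omega
  · rw [if_neg (by omega), if_pos h]
    obtain ⟨hA, hB, hC⟩ := pvLink hD2 hroot2 hroot1 h hRc
    refine ⟨hA, hB.trans hlen2, fun i => ?_⟩
    rw [hC i, hroots2 i]
    rw [hp1, hp2] at h
    split_ifs <;> omega

-- relation between A's parent list and B's label list
def pvRel (N : Nat) (P lab : List Nat) : Prop :=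
  pvDec P ∧ P.length = N ∧ lab.length = N ∧ ∀ k, k < N → lab.getD k 0 = pvR P k

lemma pvMerge_rel {N : Nat} {P lab : List Nat} {c c' : Nat}
    (h : pvRel N P lab) (hc : c < N) (hc' : c' < N) :
    pvRel N (pvUnion P c c') (pvMerged lab c c') := by
  obtain ⟨hDp, hPl, hll, hlab⟩ := h
  obtain ⟨hDu, hul, hur⟩ := pvUnion_spec hDp c c'
  have hla : lab.getD c 0 = pvR P c := hlab c hc
  have hlb : lab.getD c' 0 = pvR P c' := hlab c' hc'
  simp only [pvMerged]
  by_cases hEq : lab.getD c 0 = lab.getD c' 0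
  · rw [if_pos hEq]
    refine ⟨hDu, hul.trans hPl, hll, fun k hk => ?_⟩
    rw [hlab k hk, hur k]
    rw [hla, hlb] at hEq
    split_ifs with hcond
    · exact absurd hEq hcond.2
    · rfl
  · rw [if_neg hEq]
    refine ⟨hDu, hul.trans hPl, by simp [hll], fun k hk => ?_⟩
    have hk' : k < lab.length := by omega
    have hkm : k < (lab.map (fun x =>
        if x = (if lab.getD c 0 < lab.getD c' 0 then lab.getD c' 0 else lab.getD c 0)
        then (if lab.getD c 0 < lab.getD c' 0 then lab.getD c 0 else lab.getD c' 0)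
        else x)).length := by simpa using hk'
    rw [List.getD_eq_getElem _ _ hkm, List.getElem_map, ← List.getD_eq_getElem _ _ hk']
    rw [hlab k hk, hla, hlb, hur k]
    rw [hla, hlb] at hEq
    split_ifs <;> omega

lemma pvRel_init (N : Nat) : pvRel N (List.range N) (List.range N) := by
  have hg : ∀ k, k < N → (List.range N).getD k 0 = k := fun k hk => by
    simp [List.getD_eq_getElem?_getD, List.getElem?_range hk]
  refine ⟨?_, by simp, by simp, fun k hk => ?_⟩
  · intro i
    by_cases h : i < N
    · rw [hg i h]
    · rw [List.getD_eq_default _ _ (by simpa using h)]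
      omega
  · rw [hg k hk, pvR_of_root (hg k hk)]

lemma pvFoldlRel {α β γ : Type} {R : α → β → Prop} {f : α → γ → α} {g : β → γ → β} :
    ∀ (l : List γ) (a : α) (b : β),
      (∀ a b x, x ∈ l → R a b → R (f a x) (g b x)) → R a b →
      R (l.foldl f a) (l.foldl g b) := by
  intro l
  induction l with
  | nil => intro a b _ hab; exact hab
  | cons x xs ih =>
    intro a b h hab
    exact ih _ _ (fun a b y hy => h a b y (List.mem_cons_of_mem _ hy))
      (h a b x List.mem_cons_self hab)

lemma pvFoldlRangeMul {α : Type} (m : Nat) (f : α → Nat → α) :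
    ∀ (n : Nat) (a : α),
      (List.range (n*m)).foldl f a
        = (List.range n).foldl (fun a i => (List.range m).foldl (fun a j => f a (i*m+j)) a) a := by
  intro n
  induction n with
  | zero => intro a; simp
  | succ n ih =>
    intro a
    have h1 : (n+1)*m = n*m + m := by ring
    rw [h1, List.range_add, List.foldl_append, List.range_succ, List.foldl_append, ih]
    simp [List.foldl_map]

lemma pvIdxLt {i n j m : Nat} (hi : i < n) (hj : j < m) : i*m+j < n*m := by
  calc i*m+j < i*m+m := by omega
    _ = (i+1)*m := by ring
    _ ≤ n*m := Nat.mul_le_mul_right m hi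

lemma pvSubIdx {i m j : Nat} (hi : 0 < i) : i*m+j-m = (i-1)*m+j := by
  obtain ⟨i', rfl⟩ : ∃ i', i = i'+1 := ⟨i-1, by omega⟩
  simp [Nat.succ_mul]
  omega

-- A's main loop and B's labelling loop stay related
lemma pvPhase1 (land : List (List Int)) :
    pvRel (land.length * (land.getD 0 []).length)
      ((List.range (land.length * (land.getD 0 []).length)).foldl
        (pvAStep land (land.getD 0 []).length)
        (List.range (land.length * (land.getD 0 []).length)))
      ((List.range land.length).foldl (fun lab i =>
        (List.range (land.getD 0 []).length).foldl
          (fun lab j => pvBStep land (land.getD 0 []).length lab i j) lab)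
        (List.range (land.length * (land.getD 0 []).length))) := by
  rw [pvFoldlRangeMul]
  apply pvFoldlRel _ _ _ ?_ (pvRel_init _)
  intro P lab i hi hrel
  apply pvFoldlRel _ _ _ ?_ hrel
  intro P lab j hj hrel2
  have him : i < land.length := List.mem_range.mp hi
  have hjm : j < (land.getD 0 []).length := List.mem_range.mp hj
  set m := (land.getD 0 []).length with hmd
  have hm : 0 < m := by omega
  have heq : i*m+j = m*i + j := by ring
  have hdiv : (i*m+j)/m = i := by
    rw [heq, Nat.mul_add_div hm, Nat.div_eq_of_lt hjm, Nat.add_zero]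
  have hmod : (i*m+j) % m = j := by
    rw [heq, Nat.mul_add_mod, Nat.mod_eq_of_lt hjm]
  have hcN : i*m+j < land.length * m := pvIdxLt him hjm
  simp only [pvAStep, pvBStep, hdiv, hmod]
  by_cases h0 : (land.getD i []).getD j 0 = 0
  · rw [if_pos h0, if_pos h0]
    exact hrel2
  · rw [if_neg h0, if_neg h0]
    split_ifs with hup hl hl
    · rw [pvSubIdx hup.1]
      exact pvMerge_rel (pvMerge_rel hrel2 hcN (by omega)) hcN (pvIdxLt (by omega) hjm)
    · rw [pvSubIdx hup.1]
      exact pvMerge_rel hrel2 hcN (pvIdxLt (by omega) hjm)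
    · exact pvMerge_rel hrel2 hcN (by omega)
    · exact hrel2

-- pure per-cell steps for gas_amount_list and col_gas_group_list (reference folds)
def pvGStep (land : List (List Int)) (m : Nat) (lab : List Nat) (gas : List Int) (i j : Nat) : List Int :=
  if (land.getD i []).getD j 0 = 0 then gas
  else gas.set (lab.getD (i*m+j) 0) (gas.getD (lab.getD (i*m+j) 0) 0 + 1)

def pvCStep (land : List (List Int)) (m : Nat) (lab : List Nat)
    (cols : List (PySem.Set Nat)) (i j : Nat) : List (PySem.Set Nat) :=
  if (land.getD i []).getD j 0 = 0 then cols
  else cols.set j (PySem.Set.add (cols.getD j PySem.Set.empty) (lab.getD (i*m+j) 0))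

-- A's counting loop computes the two pure folds (the threaded parents list only delivers roots)
lemma pvPhase2 (land : List (List Int)) (n m : Nat) (lab P : List Nat)
    (gas0 : List Int) (cols0 : List (PySem.Set Nat)) (hrel : pvRel (n*m) P lab) :
    ((List.range n).foldl (fun st i =>
        (List.range m).foldl (fun st j => pvACount land m st i j) st) (gas0, cols0, P)).1
      = (List.range n).foldl (fun g i =>
          (List.range m).foldl (fun g j => pvGStep land m lab g i j) g) gas0
    ∧ ((List.range n).foldl (fun st i =>
        (List.range m).foldl (fun st j => pvACount land m st i j) st) (gas0, cols0, P)).2.1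
      = (List.range n).foldl (fun cs i =>
          (List.range m).foldl (fun cs j => pvCStep land m lab cs i j) cs) cols0 := by
  have main := pvFoldlRel
    (R := fun (st : List Int × List (PySem.Set Nat) × List Nat) (pr : List Int × List (PySem.Set Nat)) =>
      st.1 = pr.1 ∧ st.2.1 = pr.2 ∧ pvDec st.2.2 ∧ ∀ k, k < n*m → lab.getD k 0 = pvR st.2.2 k)
    (f := fun st i => (List.range m).foldl (fun st j => pvACount land m st i j) st)
    (g := fun pr i => (List.range m).foldl
      (fun pr j => (pvGStep land m lab pr.1 i j, pvCStep land m lab pr.2 i j)) pr)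
    (List.range n) (gas0, cols0, P) (gas0, cols0) ?_ ⟨rfl, rfl, hrel.1, hrel.2.2.2⟩
  · have hsplit : (fun (pr : List Int × List (PySem.Set Nat)) i => (List.range m).foldl
        (fun pr j => (pvGStep land m lab pr.1 i j, pvCStep land m lab pr.2 i j)) pr)
      = fun (pr : List Int × List (PySem.Set Nat)) i =>
          ((List.range m).foldl (fun g j => pvGStep land m lab g i j) pr.1,
           (List.range m).foldl (fun cs j => pvCStep land m lab cs i j) pr.2) := by
      funext pr i
      obtain ⟨a, b⟩ := pr
      exact PySem.List.foldl_prod_mk (fun g j => pvGStep land m lab g i j)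
        (fun cs j => pvCStep land m lab cs i j) (List.range m) a b
    rw [hsplit] at main
    have houter : List.foldl (fun (pr : List Int × List (PySem.Set Nat)) i =>
          ((List.range m).foldl (fun g j => pvGStep land m lab g i j) pr.1,
           (List.range m).foldl (fun cs j => pvCStep land m lab cs i j) pr.2))
        (gas0, cols0) (List.range n)
      = ((List.range n).foldl (fun g i =>
            (List.range m).foldl (fun g j => pvGStep land m lab g i j) g) gas0,
         (List.range n).foldl (fun cs i =>
            (List.range m).foldl (fun cs j => pvCStep land m lab cs i j) cs) cols0) :=
      PySem.List.foldl_prod_mk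
        (fun g i => (List.range m).foldl (fun g j => pvGStep land m lab g i j) g)
        (fun cs i => (List.range m).foldl (fun cs j => pvCStep land m lab cs i j) cs)
        (List.range n) gas0 cols0
    rw [houter] at main
    exact ⟨main.1, main.2.1⟩
  · intro st pr i hi hR
    apply pvFoldlRel (R := fun (st : List Int × List (PySem.Set Nat) × List Nat)
        (pr : List Int × List (PySem.Set Nat)) =>
      st.1 = pr.1 ∧ st.2.1 = pr.2 ∧ pvDec st.2.2 ∧ ∀ k, k < n*m → lab.getD k 0 = pvR st.2.2 k)
      _ _ _ ?_ hR
    intro st pr j hj hR2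
    have him : i < n := List.mem_range.mp hi
    have hjm : j < m := List.mem_range.mp hj
    have hcN : i*m+j < n*m := pvIdxLt him hjm
    by_cases h0 : (land.getD i []).getD j 0 = 0
    · simp only [pvACount, pvGStep, pvCStep, if_pos h0]
      exact hR2
    · simp only [pvACount, pvGStep, pvCStep, if_neg h0]
      obtain ⟨hs1, hs2, hs3, hs4⟩ := pvGetParent_spec hR2.2.2.1 (i*m+j+1) (i*m+j) (by omega)
      have hg1 : (pvGetParent (i*m+j+1) st.2.2 (i*m+j)).1 = lab.getD (i*m+j) 0 := by
        rw [hs1, ← hR2.2.2.2 (i*m+j) hcN]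
      refine ⟨?_, ?_, hs2, fun k hk => ?_⟩
      · show st.1.set _ _ = pr.1.set _ _
        rw [hg1, hR2.1]
      · show st.2.1.set _ _ = pr.2.set _ _
        rw [hg1, hR2.2.1]
      · show lab.getD k 0 = pvR (pvGetParent (i*m+j+1) st.2.2 (i*m+j)).2 k
        rw [hs4 k]
        exact hR2.2.2.2 k hk

-- the gas list and B's size dict agree pointwise
lemma pvGasSize (land : List (List Int)) (n m : Nat) (lab : List Nat)
    (hlt : ∀ k, k < n*m → lab.getD k 0 < n*m) :
    ∀ p : Nat,
      ((List.range n).foldl (fun g i =>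
          (List.range m).foldl (fun g j => pvGStep land m lab g i j) g)
        (List.replicate (n*m) (0:Int))).getD p 0
      = ((List.range n).foldl (fun sz i =>
          (List.range m).foldl (fun sz j => pvBCount land m lab sz i j) sz)
        (PySem.Dict.empty : PySem.Dict Nat Int)).getD p 0 := by
  have main := pvFoldlRel
    (R := fun (gas : List Int) (sz : PySem.Dict Nat Int) =>
      gas.length = n*m ∧ ∀ p, gas.getD p 0 = sz.getD p 0)
    (f := fun g i => (List.range m).foldl (fun g j => pvGStep land m lab g i j) g)
    (g := fun sz i => (List.range m).foldl (fun sz j => pvBCount land m lab sz i j) sz)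
    (List.range n) (List.replicate (n*m) (0:Int)) PySem.Dict.empty ?_ ?_
  · exact main.2
  · intro gas sz i hi hR
    apply pvFoldlRel (R := fun (gas : List Int) (sz : PySem.Dict Nat Int) =>
      gas.length = n*m ∧ ∀ p, gas.getD p 0 = sz.getD p 0) _ _ _ ?_ hR
    intro gas sz j hj hR2
    have him : i < n := List.mem_range.mp hi
    have hjm : j < m := List.mem_range.mp hj
    by_cases h0 : (land.getD i []).getD j 0 = 0
    · simp only [pvGStep, pvBCount, if_pos h0, if_neg (not_not_intro h0)]
      exact hR2
    · simp only [pvGStep, pvBCount, if_neg h0, if_pos h0]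
      have hl : lab.getD (i*m+j) 0 < n*m := hlt _ (pvIdxLt him hjm)
      refine ⟨by simp [hR2.1], fun p => ?_⟩
      rw [pvGetD_set, PySem.Dict.getD_insert]
      split_ifs with ha hb hb
      · rw [hR2.2]
      · exact absurd ha.1 hb
      · exact absurd ⟨hb, by omega⟩ ha
      · exact hR2.2 p
  · refine ⟨by simp, fun p => ?_⟩
    rw [PySem.Dict.getD_empty]
    by_cases hp : p < n*m
    · rw [List.getD_replicate _ hp]
    · rw [List.getD_eq_default _ _ (by simpa using hp)]

-- per-row effect of the cols fold on one entry
lemma pvColsRowLen (land : List (List Int)) (m : Nat) (lab : List Nat) (i : Nat) :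
    ∀ (l : List Nat) (cols : List (PySem.Set Nat)),
      (l.foldl (fun cs j => pvCStep land m lab cs i j) cols).length = cols.length := by
  intro l
  induction l with
  | nil => intro cols; rfl
  | cons x xs ihx =>
    intro cols
    rw [List.foldl_cons, ihx]
    simp only [pvCStep]
    split_ifs <;> simp

lemma pvColsNe (land : List (List Int)) (m : Nat) (lab : List Nat) (i j : Nat) :
    ∀ (l : List Nat) (cols : List (PySem.Set Nat)), j ∉ l →
      (l.foldl (fun cs j' => pvCStep land m lab cs i j') cols).getD j PySem.Set.empty
        = cols.getD j PySem.Set.empty := by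
  intro l
  induction l with
  | nil => intro cols _; rfl
  | cons x xs ihx =>
    intro cols hj
    rw [List.foldl_cons, ihx _ (fun h => hj (List.mem_cons_of_mem _ h))]
    simp only [pvCStep]
    split_ifs with h
    · rfl
    · rw [pvGetD_set, if_neg (by
        rintro ⟨rfl, -⟩
        exact hj List.mem_cons_self)]

lemma pvColsMem (land : List (List Int)) (m : Nat) (lab : List Nat) (i j : Nat) :
    ∀ (l : List Nat) (cols : List (PySem.Set Nat)), l.Nodup → j ∈ l → j < cols.length →
      (l.foldl (fun cs j' => pvCStep land m lab cs i j') cols).getD j PySem.Set.empty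
        = if (land.getD i []).getD j 0 = 0 then cols.getD j PySem.Set.empty
          else PySem.Set.add (cols.getD j PySem.Set.empty) (lab.getD (i*m+j) 0) := by
  intro l
  induction l with
  | nil => intro cols _ hmem _; exact absurd hmem (List.not_mem_nil)
  | cons x xs ihx =>
    intro cols hnd hmem hjlen
    rw [List.foldl_cons]
    by_cases hx : x = j
    · subst hx
      have hnx : x ∉ xs := (List.nodup_cons.mp hnd).1
      rw [pvColsNe _ _ _ _ _ _ _ hnx]
      simp only [pvCStep]
      split_ifs with h
      · rfl
      · rw [pvGetD_set, if_pos ⟨rfl, hjlen⟩]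
    · have hmem' : j ∈ xs := by
        rcases List.mem_cons.mp hmem with h | h
        · exact absurd h.symm hx
        · exact h
      have hstep : (pvCStep land m lab cols i x).getD j PySem.Set.empty
          = cols.getD j PySem.Set.empty := by
        simp only [pvCStep]
        split_ifs with h
        · rfl
        · rw [pvGetD_set, if_neg (by rintro ⟨rfl, -⟩; exact hx rfl)]
      have hlstep : j < (pvCStep land m lab cols i x).length := by
        simp only [pvCStep]
        split_ifs <;> simp [hjlen]
      rw [ihx _ (List.nodup_cons.mp hnd).2 hmem' hlstep, hstep]

-- the cols list entry j is the fold of adds over the column-j cells, in row order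
lemma pvColsChar (land : List (List Int)) (m : Nat) (lab : List Nat) (j : Nat) (hj : j < m) :
    ∀ (n : Nat) (cols : List (PySem.Set Nat)), cols.length = m →
      ((List.range n).foldl (fun cs i =>
          (List.range m).foldl (fun cs j' => pvCStep land m lab cs i j') cs) cols).length = m
      ∧ ((List.range n).foldl (fun cs i =>
          (List.range m).foldl (fun cs j' => pvCStep land m lab cs i j') cs) cols).getD j PySem.Set.empty
        = List.foldl PySem.Set.add (cols.getD j PySem.Set.empty)
            ((List.range n).filterMap (fun i =>
              if (land.getD i []).getD j 0 ≠ 0 then some (lab.getD (i*m+j) 0) else none)) := by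
  intro n
  induction n with
  | zero => intro cols h; exact ⟨h, by simp⟩
  | succ n ih =>
    intro cols hlen
    obtain ⟨ihl, ihg⟩ := ih cols hlen
    rw [List.range_succ, List.foldl_append, List.filterMap_append, List.foldl_cons, List.foldl_nil]
    constructor
    · rw [pvColsRowLen]
      exact ihl
    · rw [pvColsMem land m lab n j (List.range m) _ List.nodup_range (List.mem_range.mpr hj)
        (by rw [ihl]; exact hj), ihg, List.foldl_append]
      by_cases hv : (land.getD n []).getD j 0 = 0
      · rw [if_pos hv, List.filterMap_cons_none (by rw [if_neg (not_not_intro hv)]),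
          List.filterMap_nil, List.foldl_nil]
      · rw [if_neg hv, List.filterMap_cons_some (by rw [if_pos hv]),
          List.filterMap_nil, List.foldl_cons, List.foldl_nil]

theorem solution_spec : Claim_equal_solution := by
  intro land _ _
  show solution land = solution_alt land
  simp only [solution, solution_alt]
  have hrel := pvPhase1 land
  set n := land.length with hn
  set m := (land.getD 0 []).length with hmd
  set lab := (List.range n).foldl (fun lab i =>
      (List.range m).foldl (fun lab j => pvBStep land m lab i j) lab) (List.range (n*m)) with hlabd
  set Pfin := (List.range (n*m)).foldl (pvAStep land m) (List.range (n*m)) with hPd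
  have hlt : ∀ k, k < n*m → lab.getD k 0 < n*m := fun k hk =>
    lt_of_le_of_lt (le_trans (le_of_eq (hrel.2.2.2 k hk)) (pvR_le hrel.1 k)) hk
  obtain ⟨hg, hc⟩ := pvPhase2 land n m lab Pfin (List.replicate (n*m) (0:Int))
    (List.replicate m (PySem.Set.empty : PySem.Set Nat)) hrel
  rw [hg, hc]
  apply PySem.List.foldl_congr_mem
  intro acc j hj
  have hjm : j < m := List.mem_range.mp hj
  obtain ⟨hclen, hcget⟩ := pvColsChar land m lab j hjm n
    (List.replicate m (PySem.Set.empty : PySem.Set Nat)) (by simp)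
  rw [hcget, List.getD_replicate _ hjm]
  have hofl : PySem.Set.ofList ((List.range n).filterMap (fun i =>
      if (land.getD i []).getD j 0 ≠ 0 then some (lab.getD (i*m+j) 0) else none))
    = List.foldl PySem.Set.add PySem.Set.empty ((List.range n).filterMap (fun i =>
      if (land.getD i []).getD j 0 ≠ 0 then some (lab.getD (i*m+j) 0) else none)) := rfl
  rw [hofl]
  rw [PySem.List.foldl_congr_mem (List.foldl PySem.Set.add PySem.Set.empty
      ((List.range n).filterMap (fun i =>
        if (land.getD i []).getD j 0 ≠ 0 then some (lab.getD (i*m+j) 0) else none)))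
    _ _ (0:Int) (fun acc x _ => by rw [pvGasSize land n m lab hlt x])]
  rw [max_def]
  split_ifs <;> omega
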